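-- pv_equiv track=rewrite | github.com/llddaabb/gb28181-onvif-server | tools/gb28181_test_client.py | _build_100_trying
-- ===== SOURCE A (Python) =====
-- def _build_100_trying(request_text):
--     """构建 100 Trying 响应"""
--     lines = request_text.split('\r\n')
--
--     via = ""
--     from_header = ""
--     to_header = ""
--     call_id = ""
--     cseq = ""
--
--     for line in lines:
--         lower = line.lower()
--         if lower.startswith('via:'):
--             via = line
--         elif lower.startswith('from:'):
--             from_header = line
--         elif lower.startswith('to:'):
--             to_header = line
--         elif lower.startswith('call-id:'):
--             call_id = line
--         elif lower.startswith('cseq:'):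
--             cseq = line
--
--     headers = [
--         "SIP/2.0 100 Trying",
--         via,
--         from_header,
--         to_header,
--         call_id,
--         cseq,
--         "Content-Length: 0",
--         "",
--         "",
--     ]
--
--     return "\r\n".join(headers)
-- ===== SOURCE B (Python) =====
-- def _build_100_trying(request_text):
--     """构建 100 Trying 响应"""
--     lines = request_text.split('\r\n')
--
--     def last_match(prefix):
--         matches = [line for line in lines if line.lower().startswith(prefix)]
--         return matches[-1] if matches else ""
--
--     headers = [
--         "SIP/2.0 100 Trying",
--         last_match('via:'),
--         last_match('from:'),
--         last_match('to:'),
--         last_match('call-id:'),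
--         last_match('cseq:'),
--         "Content-Length: 0",
--         "",
--         "",
--     ]
--
--     return "\r\n".join(headers)
-- ===== Notes on version B (the rewrite author's own statement) =====
-- stated objective: simpler
-- what changed: Replaces the single dispatching loop over five mutable header variables with a per-prefix helper that filters the lines for each target header and takes the last match (default ''), called five times.
import Mathlib
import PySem

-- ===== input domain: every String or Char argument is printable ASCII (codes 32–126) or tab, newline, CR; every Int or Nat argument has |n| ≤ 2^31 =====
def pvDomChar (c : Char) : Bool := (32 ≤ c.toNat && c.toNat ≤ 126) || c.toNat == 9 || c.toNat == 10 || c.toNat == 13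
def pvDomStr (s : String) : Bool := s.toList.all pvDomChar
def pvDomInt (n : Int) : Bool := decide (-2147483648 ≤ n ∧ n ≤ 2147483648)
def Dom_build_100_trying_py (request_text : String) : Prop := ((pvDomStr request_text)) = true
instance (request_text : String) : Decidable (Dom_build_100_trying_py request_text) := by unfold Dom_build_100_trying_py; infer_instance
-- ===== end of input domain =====

-- B replaces A's single dispatching loop over five mutable variables by a per-prefix
-- last-match helper called five times (simpler decomposition; same cost).

-- ===== PORT A =====
-- one loop step of A's for-loop over the 5-tuple (via, from_header, to_header, call_id, cseq)
def buildStepA (st : String × String × String × String × String) (line : String) :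
    String × String × String × String × String :=
  let lower := PySem.Str.lower line
  if PySem.Str.startswith lower "via:" then (line, st.2.1, st.2.2.1, st.2.2.2.1, st.2.2.2.2)
  else if PySem.Str.startswith lower "from:" then (st.1, line, st.2.2.1, st.2.2.2.1, st.2.2.2.2)
  else if PySem.Str.startswith lower "to:" then (st.1, st.2.1, line, st.2.2.2.1, st.2.2.2.2)
  else if PySem.Str.startswith lower "call-id:" then (st.1, st.2.1, st.2.2.1, line, st.2.2.2.2)
  else if PySem.Str.startswith lower "cseq:" then (st.1, st.2.1, st.2.2.1, st.2.2.2.1, line)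
  else st

def build_100_trying_py (request_text : String) : String :=
  let lines := (PySem.Str.split? request_text "\r\n").getD []
  let st := lines.foldl buildStepA ("", "", "", "", "")
  PySem.Str.join "\r\n"
    ["SIP/2.0 100 Trying", st.1, st.2.1, st.2.2.1, st.2.2.2.1, st.2.2.2.2,
     "Content-Length: 0", "", ""]

-- ===== PORT B =====
-- last line whose lowercasing starts with the given prefix, '' if none (Source B's last_match)
def lastMatch (lines : List String) (pre : String) : String :=
  let ms := lines.filter (fun line => PySem.Str.startswith (PySem.Str.lower line) pre)
  ms.getLastD ""

def build_100_trying_py_alt (request_text : String) : String :=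
  let lines := (PySem.Str.split? request_text "\r\n").getD []
  PySem.Str.join "\r\n"
    ["SIP/2.0 100 Trying",
     lastMatch lines "via:", lastMatch lines "from:", lastMatch lines "to:",
     lastMatch lines "call-id:", lastMatch lines "cseq:",
     "Content-Length: 0", "", ""]

-- ===== PRECONDITION & SPEC =====
def Spec_build_100_trying_py (request_text : String) (out : String) : Prop := out = build_100_trying_py_alt request_text
instance (request_text : String) (out : String) : Decidable (Spec_build_100_trying_py request_text out) := by unfold Spec_build_100_trying_py; infer_instance

-- ===== CLAIM (what is proved, stated in full; the proofs are below) =====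
def Claim_equal_build_100_trying_py : Prop := ∀ (request_text : String), Dom_build_100_trying_py request_text → Spec_build_100_trying_py request_text (build_100_trying_py request_text)

-- ===== LEMMAS AND PROOFS =====

-- a shorter header prefix that is not a prefix of a longer one: the two never match the same line
lemma sw_excl (s p q : String)
    (hlen : p.toList.length ≤ q.toList.length) (hnp : ¬ p.toList <+: q.toList)
    (hq : PySem.Str.startswith s q = true) : PySem.Str.startswith s p = false := by
  by_contra h
  rw [Bool.not_eq_false] at h
  simp only [PySem.Str.startswith_eq, PySem.Chars.startswith_iff] at h hq
  exact hnp (List.prefix_of_prefix_length_le h hq hlen)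

-- symmetric form: kills the longer prefix from a match of the shorter one
lemma sw_excl' (s p q : String)
    (hlen : q.toList.length ≤ p.toList.length) (hnp : ¬ q.toList <+: p.toList)
    (hq : PySem.Str.startswith s q = true) : PySem.Str.startswith s p = false := by
  by_contra h
  rw [Bool.not_eq_false] at h
  simp only [PySem.Str.startswith_eq, PySem.Chars.startswith_iff] at h hq
  exact hnp (List.prefix_of_prefix_length_le hq h hlen)

-- generalized last-match characterization of A's fold
lemma fold_eq (lines : List String) : ∀ (v f t c q : String),
    lines.foldl buildStepA (v, f, t, c, q) =
    ((lines.filter (fun l => PySem.Str.startswith (PySem.Str.lower l) "via:")).getLastD v,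
     (lines.filter (fun l => PySem.Str.startswith (PySem.Str.lower l) "from:")).getLastD f,
     (lines.filter (fun l => PySem.Str.startswith (PySem.Str.lower l) "to:")).getLastD t,
     (lines.filter (fun l => PySem.Str.startswith (PySem.Str.lower l) "call-id:")).getLastD c,
     (lines.filter (fun l => PySem.Str.startswith (PySem.Str.lower l) "cseq:")).getLastD q) := by
  induction lines with
  | nil => intro v f t c q; rfl
  | cons l rest ih =>
    intro v f t c q
    rw [List.foldl_cons]
    simp only [buildStepA]
    by_cases h1 : PySem.Str.startswith (PySem.Str.lower l) "via:" = true
    · have e2 := sw_excl' (PySem.Str.lower l) "from:" "via:" (by decide) (by decide) h1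
      have e3 := sw_excl (PySem.Str.lower l) "to:" "via:" (by decide) (by decide) h1
      have e4 := sw_excl' (PySem.Str.lower l) "call-id:" "via:" (by decide) (by decide) h1
      have e5 := sw_excl' (PySem.Str.lower l) "cseq:" "via:" (by decide) (by decide) h1
      rw [if_pos h1, ih]
      simp at h1 e2 e3 e4 e5
      simp [List.getLast?_cons, List.getLastD_eq_getLast?, h1, e2, e3, e4, e5]
    · by_cases h2 : PySem.Str.startswith (PySem.Str.lower l) "from:" = true
      · have e3 := sw_excl (PySem.Str.lower l) "to:" "from:" (by decide) (by decide) h2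
        have e4 := sw_excl' (PySem.Str.lower l) "call-id:" "from:" (by decide) (by decide) h2
        have e5 := sw_excl (PySem.Str.lower l) "cseq:" "from:" (by decide) (by decide) h2
        rw [if_neg h1, if_pos h2, ih]
        simp at h1 h2 e3 e4 e5
        simp [List.getLast?_cons, List.getLastD_eq_getLast?, h1, h2, e3, e4, e5]
      · by_cases h3 : PySem.Str.startswith (PySem.Str.lower l) "to:" = true
        · have e4 := sw_excl' (PySem.Str.lower l) "call-id:" "to:" (by decide) (by decide) h3
          have e5 := sw_excl' (PySem.Str.lower l) "cseq:" "to:" (by decide) (by decide) h3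
          rw [if_neg h1, if_neg h2, if_pos h3, ih]
          simp at h1 h2 h3 e4 e5
          simp [List.getLast?_cons, List.getLastD_eq_getLast?, h1, h2, h3, e4, e5]
        · by_cases h4 : PySem.Str.startswith (PySem.Str.lower l) "call-id:" = true
          · have e5 := sw_excl (PySem.Str.lower l) "cseq:" "call-id:" (by decide) (by decide) h4
            rw [if_neg h1, if_neg h2, if_neg h3, if_pos h4, ih]
            simp at h1 h2 h3 h4 e5
            simp [List.getLast?_cons, List.getLastD_eq_getLast?, h1, h2, h3, h4, e5]
          · by_cases h5 : PySem.Str.startswith (PySem.Str.lower l) "cseq:" = true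
            · rw [if_neg h1, if_neg h2, if_neg h3, if_neg h4, if_pos h5, ih]
              simp at h1 h2 h3 h4 h5
              simp [List.getLast?_cons, List.getLastD_eq_getLast?, h1, h2, h3, h4, h5]
            · rw [if_neg h1, if_neg h2, if_neg h3, if_neg h4, if_neg h5, ih]
              simp at h1 h2 h3 h4 h5
              simp [List.getLastD_eq_getLast?, h1, h2, h3, h4, h5]

-- ===== VERDICT (by name: the statement is the Claim_ definition above) =====
theorem build_100_trying_py_spec : Claim_equal_build_100_trying_py := by
  intro request_text _
  simp only [Spec_build_100_trying_py, build_100_trying_py, build_100_trying_py_alt,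
    lastMatch, fold_eq]
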